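-- pv_equiv track=rewrite | github.com/J-AugustoManzano/Validacao-de-Dados | Digito Verificador/Modulo 11 Padrao/DV Verificador/verifdig_mod11.PY | validarMatricula
-- ===== SOURCE A (Python) =====
-- def validarMatricula(MATRICULA):
--     TAMANHO = len(MATRICULA)
--     if TAMANHO != 9:
--         return False
--     if MATRICULA[3] != '.' or MATRICULA[7] != '-':
--         return False
--     for I in range(TAMANHO):
--         if I != 3 and I != 7 and not MATRICULA[I].isdigit():
--             return False
--     return True
-- ===== SOURCE B (Python) =====
-- def validarMatricula(MATRICULA):
--     if len(MATRICULA) != 9: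
--         return False
--     if MATRICULA[3] != '.' or MATRICULA[7] != '-':
--         return False
--     return MATRICULA[0:3].isdigit() and MATRICULA[4:7].isdigit() and MATRICULA[8:9].isdigit()
-- ===== Notes on version B (the rewrite author's own statement) =====
-- stated objective: simpler
-- what changed: Replaces the index-skipping per-character loop with three whole-field slice.isdigit() checks (no loop, no i!=3/i!=7 guards).
import Mathlib
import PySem

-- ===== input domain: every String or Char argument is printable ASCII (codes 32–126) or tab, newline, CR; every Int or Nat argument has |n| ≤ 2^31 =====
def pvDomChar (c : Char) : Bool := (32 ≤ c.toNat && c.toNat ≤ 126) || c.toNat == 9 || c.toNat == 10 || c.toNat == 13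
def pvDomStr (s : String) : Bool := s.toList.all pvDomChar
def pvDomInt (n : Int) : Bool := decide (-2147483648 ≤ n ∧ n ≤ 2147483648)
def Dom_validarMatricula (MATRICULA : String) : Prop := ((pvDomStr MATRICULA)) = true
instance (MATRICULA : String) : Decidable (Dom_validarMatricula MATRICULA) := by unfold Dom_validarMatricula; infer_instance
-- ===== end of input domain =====

-- B replaces A's index-skipping character loop by three whole-field slice isdigit checks (simpler decomposition).

-- ===== PORT A =====
def validarMatricula (MATRICULA : String) : Bool :=
  let cs := MATRICULA.toList
  let TAMANHO := cs.length
  if TAMANHO ≠ 9 then false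
  else if ¬ (PySem.List.pyGet? cs 3 = some '.') ∨ ¬ (PySem.List.pyGet? cs 7 = some '-') then false
  else
    -- for I in range(TAMANHO): early-return-False on a failing index = all indices pass
    (List.range TAMANHO).all (fun I =>
      if I ≠ 3 ∧ I ≠ 7 then
        match PySem.List.pyGet? cs (I : Int) with
        | some c => PySem.Chars.isdigit c
        | none => false
      else true)

-- ===== PORT B =====
def validarMatricula_alt (MATRICULA : String) : Bool :=
  let cs := MATRICULA.toList
  if cs.length ≠ 9 then false
  else if ¬ (PySem.List.pyGet? cs 3 = some '.') ∨ ¬ (PySem.List.pyGet? cs 7 = some '-') then false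
  else
    PySem.Chars.strIsdigit (PySem.List.slice cs (some 0) (some 3)) &&
    PySem.Chars.strIsdigit (PySem.List.slice cs (some 4) (some 7)) &&
    PySem.Chars.strIsdigit (PySem.List.slice cs (some 8) (some 9))

-- ===== PRECONDITION & SPEC =====
def Spec_validarMatricula (MATRICULA : String) (out : Bool) : Prop := out = validarMatricula_alt MATRICULA
instance (MATRICULA : String) (out : Bool) : Decidable (Spec_validarMatricula MATRICULA out) := by unfold Spec_validarMatricula; infer_instance

-- ===== CLAIM (what is proved, stated in full; the proofs are below) =====
def Claim_equal_validarMatricula : Prop := ∀ (MATRICULA : String), Dom_validarMatricula MATRICULA → Spec_validarMatricula MATRICULA (validarMatricula MATRICULA)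

-- ===== LEMMAS AND PROOFS =====

theorem validarMatricula_agree (MATRICULA : String) :
    validarMatricula MATRICULA = validarMatricula_alt MATRICULA := by
  unfold validarMatricula validarMatricula_alt
  generalize MATRICULA.toList = cs
  by_cases h9 : cs.length = 9
  · match cs, h9 with
    | [a, b, c, d, e, f, g, h, i], _ =>
      simp [PySem.List.pyGet?, PySem.List.pyIdx?, PySem.List.slice, PySem.Chars.strIsdigit,
      PySem.List.clampIdx, List.range_succ, Bool.and_assoc, Bool.and_comm, Bool.and_left_comm]
  · simp [h9]

-- ===== VERDICT (by name: the statement is the Claim_ definition above) =====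
theorem validarMatricula_spec : Claim_equal_validarMatricula := by
  intro M _
  unfold Spec_validarMatricula
  exact validarMatricula_agree M
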